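-- pv_equiv track=rewrite | github.com/pyj4104/LeetCode-Practice | Python/files/n1737minCharacters.py | countNumChangesToUnify
-- ===== SOURCE A (Python) =====
-- def countNumChangesToUnify(s: str) -> int:
-- 	charDict = {}
-- 	dominantChar = 'a'
-- 	numOfDominantChar = 0
-- 	for char in s:
-- 		if char not in charDict:
-- 			charDict[char] = 1
-- 		else:
-- 			charDict[char] += 1
-- 		numOfDominantChar += 1 if char == dominantChar else 0
-- 		if numOfDominantChar < charDict[char]:
-- 			dominantChar = char
-- 			numOfDominantChar = charDict[char]
-- 	return len(s) - numOfDominantChar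
-- ===== SOURCE B (Python) =====
-- def countNumChangesToUnify(s: str) -> int:
--     def maxFreq(chars):
--         if not chars:
--             return 0
--         c = chars[0]
--         same = chars.count(c)
--         rest = [x for x in chars if x != c]
--         return max(same, maxFreq(rest))
--     return len(s) - maxFreq(list(s))
-- ===== Notes on version B (the rewrite author's own statement) =====
-- stated objective: alternative
-- what changed: B drops A's dict and online dominant-character tracking entirely: it recursively partitions the character list on its first element (count the head's occurrences, filter them out, recurse on the rest) and returns len(s) minus the recursive maximum frequency.
import Mathlib
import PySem

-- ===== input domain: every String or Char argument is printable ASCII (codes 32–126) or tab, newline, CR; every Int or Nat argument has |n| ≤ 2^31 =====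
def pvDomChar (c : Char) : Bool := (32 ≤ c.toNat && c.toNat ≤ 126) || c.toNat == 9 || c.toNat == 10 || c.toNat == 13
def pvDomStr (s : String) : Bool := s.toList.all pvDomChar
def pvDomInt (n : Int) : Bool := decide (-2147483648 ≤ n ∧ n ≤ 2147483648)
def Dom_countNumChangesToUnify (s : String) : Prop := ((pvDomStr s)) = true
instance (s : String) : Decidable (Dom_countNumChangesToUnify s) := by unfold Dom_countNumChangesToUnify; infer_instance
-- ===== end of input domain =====

-- B replaces A's dict + online dominant-character tracking by a recursive partition on the first
-- character (count it, filter it out, recurse); same values, no speed claim.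

-- ===== PORT A =====
-- one loop iteration of A: state = (charDict, dominantChar, numOfDominantChar)
def pvAStep (st : PySem.Dict Char Int × Char × Int) (c : Char) : PySem.Dict Char Int × Char × Int :=
  let d := st.1
  let dom := st.2.1
  let num := st.2.2
  let d' := if d.contains c = false then d.insert c 1 else d.insert c (d.getD c 0 + 1)
  let num' := num + (if c == dom then (1 : Int) else 0)
  if num' < d'.getD c 0 then (d', c, d'.getD c 0) else (d', dom, num')

def countNumChangesToUnify (s : String) : Int :=
  let st := s.toList.foldl pvAStep (PySem.Dict.empty, 'a', 0)
  PySem.Str.len s - st.2.2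

-- ===== PORT B =====
-- termination of maxFreq: filtering out the head strictly shrinks the list
lemma pv_filter_ne_lt (c : Char) (t : List Char) :
    ((c :: t).filter (fun x => x ≠ c)).length < (c :: t).length := by
  rw [List.filter_cons_of_neg (by simp)]
  exact Nat.lt_succ_of_le (List.length_filter_le _ _)

-- maxFreq(chars): 0 on []; else max(chars.count(chars[0]), maxFreq([x for x in chars if x != chars[0]]))
def pvMaxFreq : List Char → Int
  | [] => 0
  | c :: t =>
    let chars := c :: t
    let same : Int := (PySem.List.count chars c : Int)
    let rest := chars.filter (fun x => x ≠ c)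
    max same (pvMaxFreq rest)
termination_by l => l.length
decreasing_by
  exact pv_filter_ne_lt c t

def countNumChangesToUnify_alt (s : String) : Int :=
  PySem.Str.len s - pvMaxFreq s.toList

-- ===== PRECONDITION & SPEC =====
def Spec_countNumChangesToUnify (s : String) (out : Int) : Prop := out = countNumChangesToUnify_alt s
instance (s : String) (out : Int) : Decidable (Spec_countNumChangesToUnify s out) := by unfold Spec_countNumChangesToUnify; infer_instance

-- ===== CLAIM (what is proved, stated in full; the proofs are below) =====
def Claim_equal_countNumChangesToUnify : Prop := ∀ (s : String), Dom_countNumChangesToUnify s → Spec_countNumChangesToUnify s (countNumChangesToUnify s)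

-- ===== LEMMAS AND PROOFS =====

-- invariant of A's loop: every count is ≥ 1 and ≤ num, and (unless nothing was seen yet)
-- num is exactly the dominant character's count
def pvInv (d : PySem.Dict Char Int) (dom : Char) (num : Int) : Prop :=
  (∀ v ∈ d.values, 1 ≤ v ∧ v ≤ num) ∧
  (d.get? dom = some num ∨ (num = 0 ∧ d = PySem.Dict.empty))

lemma pv_mem_values_of_get? {d : PySem.Dict Char Int} {k : Char} {v : Int}
    (h : d.get? k = some v) : v ∈ d.values :=
  List.mem_map.mpr ⟨(k, v), PySem.Dict.mem_items_of_get?_eq_some d h, rfl⟩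

lemma pv_values_empty : (PySem.Dict.empty : PySem.Dict Char Int).values = [] := rfl

-- A's step with the dict branch resolved: both branches insert count+1
lemma pvAStep_eq (d : PySem.Dict Char Int) (dom : Char) (num : Int) (c : Char) :
    pvAStep (d, dom, num) c =
      if num + (if c == dom then (1 : Int) else 0) < d.getD c 0 + 1
      then (d.insert c (d.getD c 0 + 1), c, d.getD c 0 + 1)
      else (d.insert c (d.getD c 0 + 1), dom, num + (if c == dom then (1 : Int) else 0)) := by
  unfold pvAStep
  by_cases hc : d.contains c = false
  · have h0 : d.getD c 0 = (0 : Int) := PySem.Dict.getD_of_not_contains d 0 hc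
    simp [hc, h0, PySem.Dict.getD_insert_self]
  · rw [Bool.not_eq_false] at hc
    simp [hc, PySem.Dict.getD_insert_self]

lemma pv_step_dict (d : PySem.Dict Char Int) (dom : Char) (num : Int) (c : Char) :
    (pvAStep (d, dom, num) c).1 = d.insert c (d.getD c 0 + 1) := by
  rw [pvAStep_eq]
  split <;> (try split) <;> rfl

lemma pv_step_inv (d : PySem.Dict Char Int) (dom : Char) (num : Int) (c : Char)
    (h : pvInv d dom num) :
    pvInv (pvAStep (d, dom, num) c).1 (pvAStep (d, dom, num) c).2.1 (pvAStep (d, dom, num) c).2.2 := by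
  obtain ⟨hub, hdom⟩ := h
  have hk0 : 0 ≤ d.getD c 0 := by
    by_cases hc : d.contains c = true
    · have hs : (d.get? c).isSome := by rw [← PySem.Dict.contains_eq_isSome_get?]; exact hc
      obtain ⟨v, hv⟩ := Option.isSome_iff_exists.mp hs
      have h1 := (hub v (pv_mem_values_of_get? hv)).1
      rw [PySem.Dict.getD_of_get?_eq_some d 0 hv]; omega
    · rw [PySem.Dict.getD_of_not_contains d 0 (by simpa using hc)]
  have hnum0 : 0 ≤ num := by
    rcases hdom with hg | ⟨h0, _⟩
    · have := (hub num (pv_mem_values_of_get? hg)).1; omega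
    · omega
  have hvals : ∀ (m : Int), d.getD c 0 + 1 ≤ m → num ≤ m →
      ∀ v ∈ (d.insert c (d.getD c 0 + 1)).values, 1 ≤ v ∧ v ≤ m := by
    intro m hm1 hm2 v hv
    rcases PySem.Dict.mem_values_insert d c _ v hv with rfl | hv'
    · omega
    · have := hub v hv'; omega
  rw [pvAStep_eq]
  by_cases hcd : (c == dom) = true
  · -- c = dominantChar: num increments and stays the dominant count
    have hceq : c = dom := by simpa using hcd
    subst hceq
    have hknum : d.getD c 0 = num := by
      rcases hdom with hg | ⟨hz, hde⟩
      · exact PySem.Dict.getD_of_get?_eq_some d 0 hg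
      · subst hz; subst hde; exact PySem.Dict.getD_empty c 0
    rw [show (if c == c then (1 : Int) else 0) = 1 from by simp, hknum]
    rw [if_neg (by omega)]
    dsimp only
    have hv := hvals (num + 1) (by rw [hknum]) (by omega)
    rw [hknum] at hv
    exact ⟨hv, Or.inl (PySem.Dict.get?_insert_self d c (num + 1))⟩
  · -- c ≠ dominantChar: num unchanged; switch iff the new count exceeds it
    have hne : c ≠ dom := by simpa using hcd
    rw [show (if c == dom then (1 : Int) else 0) = 0 from by simp [hcd], add_zero]
    split_ifs with hlt
    · dsimp only
      exact ⟨hvals (d.getD c 0 + 1) le_rfl (by omega),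
        Or.inl (PySem.Dict.get?_insert_self d c (d.getD c 0 + 1))⟩
    · dsimp only
      refine ⟨hvals num (by omega) le_rfl, ?_⟩
      rcases hdom with hg | ⟨hz, hde⟩
      · exact Or.inl (by rw [PySem.Dict.get?_insert_of_ne d _ (Ne.symm hne)]; exact hg)
      · -- impossible: on an empty dict the switch branch fires
        exfalso
        subst hz; subst hde
        rw [PySem.Dict.getD_empty] at hlt
        omega

lemma pv_fold_inv (l : List Char) :
    ∀ (d : PySem.Dict Char Int) (dom : Char) (num : Int), pvInv d dom num →
      (l.foldl pvAStep (d, dom, num)).1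
        = l.foldl (fun d c => d.insert c (d.getD c 0 + 1)) d ∧
      pvInv (l.foldl pvAStep (d, dom, num)).1 (l.foldl pvAStep (d, dom, num)).2.1
        (l.foldl pvAStep (d, dom, num)).2.2 := by
  induction l with
  | nil => intro d dom num h; exact ⟨rfl, h⟩
  | cons c t ih =>
    intro d dom num h
    have hstep := pv_step_inv d dom num c h
    have hd := pv_step_dict d dom num c
    simp only [List.foldl_cons]
    obtain ⟨h1, h2⟩ := ih (pvAStep (d, dom, num) c).1 (pvAStep (d, dom, num) c).2.1
      (pvAStep (d, dom, num) c).2.2 hstep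
    exact ⟨by rw [← hd]; exact h1, h2⟩

-- membership of count values in counter's values
lemma pv_count_mem_values {l : List Char} {c : Char} (h : c ∈ l) :
    ((l.count c : Int)) ∈ (PySem.Dict.counter l).values := by
  refine List.mem_map.mpr ⟨(c, (l.count c : Int)), ?_, rfl⟩
  rw [PySem.Dict.items_counter]
  exact List.mem_map.mpr ⟨c, (PySem.Set.mem_ofList _ _).mpr h, rfl⟩

lemma pv_values_counter {l : List Char} {v : Int}
    (h : v ∈ (PySem.Dict.counter l).values) : ∃ c ∈ l, v = (l.count c : Int) := by
  obtain ⟨⟨k, w⟩, hkw, rfl⟩ := List.mem_map.mp h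
  rw [PySem.Dict.items_counter] at hkw
  obtain ⟨c, hc, he⟩ := List.mem_map.mp hkw
  obtain ⟨rfl, rfl⟩ := Prod.mk.injEq .. ▸ he
  exact ⟨c, (PySem.Set.mem_ofList _ _).mp hc, rfl⟩

-- maxFreq unfolding on a nonempty list, lets resolved
lemma pvMaxFreq_nil : pvMaxFreq [] = 0 := by
  simp [pvMaxFreq]

lemma pvMaxFreq_cons (c : Char) (t : List Char) :
    pvMaxFreq (c :: t) = max (((c :: t).count c : Nat) : Int)
      (pvMaxFreq ((c :: t).filter (fun x => x ≠ c))) := by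
  rw [pvMaxFreq]
  simp [PySem.List.count_eq]

-- maxFreq dominates every count
lemma pv_le_maxFreq (l : List Char) : ∀ c ∈ l, ((l.count c : Nat) : Int) ≤ pvMaxFreq l := by
  induction l using pvMaxFreq.induct with
  | case1 => intro c h; exact absurd h (List.not_mem_nil)
  | case2 c t chars rest ih =>
    intro x hx
    rw [pvMaxFreq_cons]
    by_cases hxc : x = c
    · subst hxc
      exact le_max_left _ _
    · have hxr : x ∈ (c :: t).filter (fun y => y ≠ c) :=
        List.mem_filter.mpr ⟨hx, by simp [hxc]⟩
      have h : ((((c :: t).filter (fun y => y ≠ c)).count x : Nat) : Int)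
          ≤ pvMaxFreq ((c :: t).filter (fun y => y ≠ c)) := ih x hxr
      have hcnt : ((c :: t).filter (fun y => y ≠ c)).count x = (c :: t).count x :=
        List.count_filter (by simp [hxc])
      rw [hcnt] at h
      exact le_max_of_le_right h

-- a nonempty list's maxFreq is a count of one of its elements
lemma pv_maxFreq_mem (l : List Char) (hne : l ≠ []) :
    ∃ c ∈ l, pvMaxFreq l = ((l.count c : Nat) : Int) := by
  induction l using pvMaxFreq.induct with
  | case1 => exact absurd rfl hne
  | case2 c t chars rest ih =>
    rw [pvMaxFreq_cons]
    by_cases hr : (c :: t).filter (fun y => y ≠ c) = []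
    · refine ⟨c, List.mem_cons_self, ?_⟩
      rw [hr, pvMaxFreq_nil]
      have : (0 : Int) ≤ (((c :: t).count c : Nat) : Int) := Int.natCast_nonneg _
      omega
    · obtain ⟨x, hx, hmx⟩ := ih hr
      have hxt : x ∈ c :: t := (List.mem_filter.mp hx).1
      have hxc : x ≠ c := by
        have := (List.mem_filter.mp hx).2; simpa using this
      have hcnt : ((c :: t).filter (fun y => y ≠ c)).count x = (c :: t).count x :=
        List.count_filter (by simp [hxc])
      rcases le_total (pvMaxFreq ((c :: t).filter (fun y => y ≠ c)))
          (((c :: t).count c : Nat) : Int) with hle | hle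
      · exact ⟨c, List.mem_cons_self, by rw [max_eq_left hle]⟩
      · refine ⟨x, hxt, ?_⟩
        rw [max_eq_right hle]
        have hmx' : pvMaxFreq ((c :: t).filter (fun y => y ≠ c))
            = ((((c :: t).filter (fun y => y ≠ c)).count x : Nat) : Int) := hmx
        rw [hmx', hcnt]

-- ===== VERDICT (by name: the statement is the Claim_ definition above) =====
theorem countNumChangesToUnify_spec : Claim_equal_countNumChangesToUnify := by
  intro s _
  unfold Spec_countNumChangesToUnify countNumChangesToUnify countNumChangesToUnify_alt
  have hinv0 : pvInv PySem.Dict.empty 'a' 0 := by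
    refine ⟨?_, Or.inr ⟨rfl, rfl⟩⟩
    intro v hv
    rw [pv_values_empty] at hv
    exact absurd hv (List.not_mem_nil)
  obtain ⟨hd, hinv⟩ := pv_fold_inv s.toList PySem.Dict.empty 'a' 0 hinv0
  rw [PySem.Dict.foldl_insert_getD_add_one_eq_counter] at hd
  obtain ⟨hub, hdom⟩ := hinv
  rw [hd] at hub hdom
  show PySem.Str.len s - (s.toList.foldl pvAStep (PySem.Dict.empty, 'a', 0)).2.2
      = PySem.Str.len s - pvMaxFreq s.toList
  have hnum : (s.toList.foldl pvAStep (PySem.Dict.empty, 'a', 0)).2.2 = pvMaxFreq s.toList := by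
    rcases eq_or_ne s.toList [] with hl | hl
    · rcases hdom with hg | ⟨hz, _⟩
      · have := pv_values_counter (pv_mem_values_of_get? hg)
        obtain ⟨c, hc, _⟩ := this
        rw [hl] at hc; exact absurd hc (List.not_mem_nil)
      · rw [hz, hl]
        simp [pvMaxFreq]
    · rcases hdom with hg | ⟨_, hde⟩
      · obtain ⟨c0, hc0, he0⟩ := pv_values_counter (pv_mem_values_of_get? hg)
        obtain ⟨c1, hc1, he1⟩ := pv_maxFreq_mem s.toList hl
        have h1 : (s.toList.foldl pvAStep (PySem.Dict.empty, 'a', 0)).2.2 ≤ pvMaxFreq s.toList := he0 ▸ pv_le_maxFreq s.toList c0 hc0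
        have h2 : pvMaxFreq s.toList ≤ (s.toList.foldl pvAStep (PySem.Dict.empty, 'a', 0)).2.2 := by
          rw [he1]
          exact (hub _ (pv_count_mem_values hc1)).2
        omega
      · exfalso
        obtain ⟨c, t, hct⟩ := List.exists_cons_of_ne_nil hl
        have h1 := PySem.Dict.getD_counter s.toList c
        rw [hde, PySem.Dict.getD_empty] at h1
        have h2 : s.toList.count c ≠ 0 := by rw [hct]; simp
        omega
  rw [hnum]
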